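-- pv_equiv track=rewrite | github.com/codecontemplator/aoc2024 | day7/d7p1.py | calc
-- ===== SOURCE A (Python) =====
-- def calc(l):
--     if len(l) == 1:
--         return [l[0]]
--     else:
--         a = l[0]
--         b = l[1]
--         l2 = l[2:]
--         x = [a * b] + l2
--         y = [a + b] + l2
--         r1 = calc(x)
--         r2 = calc(y)
--         return r1 + r2
-- ===== SOURCE B (Python) =====
-- def calc(l):
--     results = [l[0]]
--     for n in l[1:]:
--         results = [v for r in results for v in (r * n, r + n)]
--     return results
-- ===== Notes on version B (the rewrite author's own statement) =====
-- stated objective: simpler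
-- what changed: Replaces the binary recursion on a shrinking prefix-rewritten list with a single iterative pass that keeps a frontier list of partial results, expanding each value by multiply-then-add for every next element.
import Mathlib
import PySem

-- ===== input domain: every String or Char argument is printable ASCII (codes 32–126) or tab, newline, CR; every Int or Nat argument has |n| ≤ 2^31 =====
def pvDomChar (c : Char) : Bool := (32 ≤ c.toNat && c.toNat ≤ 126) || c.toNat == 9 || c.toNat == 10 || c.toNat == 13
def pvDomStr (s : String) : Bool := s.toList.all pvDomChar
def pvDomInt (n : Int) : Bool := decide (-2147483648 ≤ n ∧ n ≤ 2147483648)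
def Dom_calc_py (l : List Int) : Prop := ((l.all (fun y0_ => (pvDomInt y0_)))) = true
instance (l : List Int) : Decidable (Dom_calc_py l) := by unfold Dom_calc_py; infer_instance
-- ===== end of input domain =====

-- B replaces A's binary recursion on a prefix-rewritten list by one iterative pass
-- maintaining a frontier of partial results (objective: simpler).

-- ===== PORT A =====
-- A's recursion: len==1 → [l[0]]; else recurse on [a*b]+rest and [a+b]+rest.
-- The [] branch is unreachable under Pre_ (Python raises IndexError on []).
def calc_py (l : List Int) : List Int :=
  match l with
  | [] => []
  | [x] => [x]
  | a :: b :: l2 => calc_py ((a * b) :: l2) ++ calc_py ((a + b) :: l2)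
termination_by l.length

-- ===== PORT B =====
-- Source B: results = [l[0]]; for n in l[1:]: results = [v for r in results for v in (r*n, r+n)]
def calc_py_alt (l : List Int) : List Int :=
  match l with
  | [] => []
  | x :: rest => rest.foldl (fun results n => results.flatMap (fun r => [r * n, r + n])) [x]

-- ===== PRECONDITION & SPEC =====
-- Pre_ excludes the empty list, on which Python A (and B) raise IndexError.
def Pre_calc_py (l : List Int) : Prop := l ≠ []
instance (l : List Int) : Decidable (Pre_calc_py l) := by unfold Pre_calc_py; infer_instance
def pvWitness_calc_py : List Int := ([3, 4, 5])
def Spec_calc_py (l : List Int) (out : List Int) : Prop := out = calc_py_alt l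
instance (l : List Int) (out : List Int) : Decidable (Spec_calc_py l out) := by unfold Spec_calc_py; infer_instance

-- ===== CLAIM (what is proved, stated in full; the proofs are below) =====
def Claim_equal_calc_py : Prop := ∀ (l : List Int), Dom_calc_py l → Pre_calc_py l → Spec_calc_py l (calc_py l)

-- ===== LEMMAS AND PROOFS =====

-- the frontier step distributes over append of frontiers
theorem foldl_step_append (rest : List Int) (s t : List Int) :
    rest.foldl (fun results n => results.flatMap (fun r => [r * n, r + n])) (s ++ t)
      = rest.foldl (fun results n => results.flatMap (fun r => [r * n, r + n])) s
        ++ rest.foldl (fun results n => results.flatMap (fun r => [r * n, r + n])) t := by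
  induction rest generalizing s t with
  | nil => simp
  | cons n rs ih => simp [List.foldl, List.flatMap_append, ih]

theorem calc_py_eq_foldl (rest : List Int) (a : Int) :
    calc_py (a :: rest)
      = rest.foldl (fun results n => results.flatMap (fun r => [r * n, r + n])) [a] := by
  induction rest generalizing a with
  | nil => simp [calc_py]
  | cons n rs ih =>
    rw [calc_py, ih, ih, List.foldl_cons, ← foldl_step_append]
    rfl

-- ===== VERDICT (by name: the statement is the Claim_ definition above) =====
theorem calc_py_spec : Claim_equal_calc_py := by
  intro l _ hpre
  unfold Spec_calc_py
  match l with
  | [] => exact absurd rfl hpre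
  | a :: rest => simpa [calc_py_alt] using calc_py_eq_foldl rest a
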